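-- pv_equiv track=rewrite | github.com/JustinVerkade/AdventOfCode | 2024/Day_21/test.py | simulateKeypad
-- ===== SOURCE A (Python) =====
-- keypad = {
--     (0, 0):'7', (1, 0):'8', (2, 0):'9',
--     (0, 1):'4', (1, 1):'5', (2, 1):'6',
--     (0, 2):'1', (1, 2):'2', (2, 2):'3',
--     (1, 3):'0', (2, 3):'A'}
--
-- def simulateKeypad(commands:str):
--     pos_x = 2
--     pos_y = 3
--     output = ""
--     for cmd in commands:
--         if cmd == '^':
--             pos_y -= 1
--         elif cmd == 'v':
--             pos_y += 1
--         elif cmd == '<':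
--             pos_x -= 1
--         elif cmd == '>':
--             pos_x += 1
--         elif cmd == 'A':
--             output += keypad[(pos_x, pos_y)]
--     return output
-- ===== SOURCE B (Python) =====
-- keypad = {
--     (0, 0):'7', (1, 0):'8', (2, 0):'9',
--     (0, 1):'4', (1, 1):'5', (2, 1):'6',
--     (0, 2):'1', (1, 2):'2', (2, 2):'3',
--     (1, 3):'0', (2, 3):'A'}
--
-- def simulateKeypad(commands: str):
--     # Split on 'A': each press happens after applying one segment's net displacement.
--     segments = commands.split('A')
--     pos_x, pos_y = 2, 3
--     out = []
--     for seg in segments[:-1]: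
--         pos_x += seg.count('>') - seg.count('<')
--         pos_y += seg.count('v') - seg.count('^')
--         out.append(keypad[(pos_x, pos_y)])
--     return "".join(out)
-- ===== Notes on version B (the rewrite author's own statement) =====
-- stated objective: faster
-- what changed: Instead of a per-character Python state machine, B splits the command string on the press character and, for each segment before a press, applies the net displacement computed with str.count, looking up the keypad only at presses (C-level split/count instead of a Python-level loop).
import Mathlib
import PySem

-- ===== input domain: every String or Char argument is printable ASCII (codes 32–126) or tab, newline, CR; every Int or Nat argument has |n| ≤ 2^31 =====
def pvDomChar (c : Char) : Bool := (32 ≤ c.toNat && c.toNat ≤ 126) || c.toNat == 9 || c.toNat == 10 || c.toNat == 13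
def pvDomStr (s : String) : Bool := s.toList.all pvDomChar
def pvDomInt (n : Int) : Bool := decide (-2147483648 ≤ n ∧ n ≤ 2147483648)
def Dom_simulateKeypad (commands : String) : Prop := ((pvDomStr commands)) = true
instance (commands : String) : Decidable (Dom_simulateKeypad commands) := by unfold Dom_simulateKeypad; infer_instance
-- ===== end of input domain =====

-- B replaces A's per-character state machine by splitting the commands on 'A' and applying
-- each segment's net displacement (character counts) before every press (alternative decomposition).


-- ===== PORT A =====
-- the module-level keypad dict; lookup failure (Python KeyError) is excluded by Pre_, '?' is a dummy
def pvKeypad : PySem.Dict (Int × Int) Char := PySem.Dict.ofList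
  [((0, 0), '7'), ((1, 0), '8'), ((2, 0), '9'),
   ((0, 1), '4'), ((1, 1), '5'), ((2, 1), '6'),
   ((0, 2), '1'), ((1, 2), '2'), ((2, 2), '3'),
   ((1, 3), '0'), ((2, 3), 'A')]

def keyChar (x y : Int) : Char := (PySem.Dict.get? pvKeypad (x, y)).getD '?'

def stepA (st : Int × Int × List Char) (cmd : Char) : Int × Int × List Char :=
  let (x, y, out) := st
  if cmd = '^' then (x, y - 1, out)
  else if cmd = 'v' then (x, y + 1, out)
  else if cmd = '<' then (x - 1, y, out)
  else if cmd = '>' then (x + 1, y, out)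
  else if cmd = 'A' then (x, y, out ++ [keyChar x y])
  else (x, y, out)

def simulateKeypad (commands : String) : String :=
  String.mk (commands.toList.foldl stepA (2, 3, [])).2.2

-- ===== PORT B =====
-- commands.split('A') on the character list (Python str.split with a one-char separator)
def splitA : List Char → List (List Char)
  | [] => [[]]
  | c :: cs =>
    if c = 'A' then [] :: splitA cs
    else match splitA cs with
      | [] => [[c]]
      | s :: rest => (c :: s) :: rest

-- the loop over segments[:-1]: apply the segment's net displacement, then press
def goB : List (List Char) → Int → Int → List Char
  | [], _, _ => []
  | [_], _, _ => []
  | seg :: rest, x, y =>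
    let x' := x + (seg.count '>' : Int) - (seg.count '<' : Int)
    let y' := y + (seg.count 'v' : Int) - (seg.count '^' : Int)
    keyChar x' y' :: goB rest x' y'

def simulateKeypad_alt (commands : String) : String :=
  String.mk (goB (splitA commands.toList) 2 3)

-- ===== PRECONDITION & SPEC =====
-- Pre_ excludes exactly the inputs where Python A raises KeyError: some 'A' is pressed while the
-- position (determined by the direction-character counts of the prefix) is off the keypad.
def Pre_simulateKeypad (commands : String) : Prop :=
  ∀ i, i < commands.toList.length → commands.toList.getD i ' ' = 'A' →
    (let t := commands.toList.take i
     let x : Int := 2 + (t.count '>' : Int) - (t.count '<' : Int)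
     let y : Int := 3 + (t.count 'v' : Int) - (t.count '^' : Int)
     (0 ≤ x ∧ x ≤ 2 ∧ 0 ≤ y ∧ y ≤ 2) ∨ (y = 3 ∧ 1 ≤ x ∧ x ≤ 2))
instance (commands : String) : Decidable (Pre_simulateKeypad commands) := by
  unfold Pre_simulateKeypad; infer_instance
def pvWitness_simulateKeypad : String := "^^<<A>A>AvvA"
def Spec_simulateKeypad (commands : String) (out : String) : Prop := out = simulateKeypad_alt commands
instance (commands : String) (out : String) : Decidable (Spec_simulateKeypad commands out) := by unfold Spec_simulateKeypad; infer_instance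

-- ===== CLAIM (what is proved, stated in full; the proofs are below) =====
def Claim_equal_simulateKeypad : Prop := ∀ (commands : String), Dom_simulateKeypad commands → Pre_simulateKeypad commands → Spec_simulateKeypad commands (simulateKeypad commands)

-- ===== LEMMAS AND PROOFS =====
lemma splitA_ne_nil (cs : List Char) : splitA cs ≠ [] := by
  cases cs with
  | nil => simp [splitA]
  | cons c cs =>
    simp only [splitA]
    split_ifs
    · simp
    · cases splitA cs <;> simp

lemma stepA_move (c : Char) (hA : c ≠ 'A') (x y : Int) (out : List Char) :
    stepA (x, y, out) c =
      (x + (if c = '>' then 1 else 0) - (if c = '<' then 1 else 0),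
       y + (if c = 'v' then 1 else 0) - (if c = '^' then 1 else 0), out) := by
  simp only [stepA]
  split_ifs with h1 h2 h3 h4 h5 <;> simp_all

lemma goB_shift (c : Char) (s : List Char) (rest : List (List Char)) (x y : Int) :
    goB ((c :: s) :: rest) x y =
      goB (s :: rest)
        (x + (if c = '>' then 1 else 0) - (if c = '<' then 1 else 0))
        (y + (if c = 'v' then 1 else 0) - (if c = '^' then 1 else 0)) := by
  cases rest with
  | nil => simp [goB]
  | cons t r =>
    simp only [goB, List.count_cons, beq_iff_eq]
    have hx : x + ((s.count '>' + if c = '>' then 1 else 0 : Nat) : Int)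
        - ((s.count '<' + if c = '<' then 1 else 0 : Nat) : Int)
        = x + (if c = '>' then 1 else 0) - (if c = '<' then 1 else 0)
          + (s.count '>' : Int) - (s.count '<' : Int) := by
      split_ifs <;> push_cast <;> omega
    have hy : y + ((s.count 'v' + if c = 'v' then 1 else 0 : Nat) : Int)
        - ((s.count '^' + if c = '^' then 1 else 0 : Nat) : Int)
        = y + (if c = 'v' then 1 else 0) - (if c = '^' then 1 else 0)
          + (s.count 'v' : Int) - (s.count '^' : Int) := by
      split_ifs <;> push_cast <;> omega
    rw [hx, hy]

lemma main_fold (cs : List Char) : ∀ (x y : Int) (out : List Char),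
    (cs.foldl stepA (x, y, out)).2.2 = out ++ goB (splitA cs) x y := by
  induction cs with
  | nil => intro x y out; simp [splitA, goB]
  | cons c cs ih =>
    intro x y out
    by_cases hA : c = 'A'
    · subst hA
      have hstep : stepA (x, y, out) 'A' = (x, y, out ++ [keyChar x y]) := by
        simp [stepA]
      rw [List.foldl_cons, hstep, ih]
      obtain ⟨s, rest, hs⟩ : ∃ s rest, splitA cs = s :: rest := by
        cases h : splitA cs with
        | nil => exact absurd h (splitA_ne_nil cs)
        | cons s rest => exact ⟨s, rest, rfl⟩
      have hsplit : splitA ('A' :: cs) = [] :: splitA cs := by simp [splitA]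
      rw [hsplit, hs]
      have : goB ([] :: s :: rest) x y = keyChar x y :: goB (s :: rest) x y := by
        simp [goB]
      rw [this]
      simp
    · rw [List.foldl_cons, stepA_move c hA, ih]
      obtain ⟨s, rest, hs⟩ : ∃ s rest, splitA cs = s :: rest := by
        cases h : splitA cs with
        | nil => exact absurd h (splitA_ne_nil cs)
        | cons s rest => exact ⟨s, rest, rfl⟩
      have hsplit : splitA (c :: cs) = (c :: s) :: rest := by
        simp only [splitA, if_neg hA, hs]
      rw [hsplit, goB_shift, hs]

-- ===== VERDICT (by name: the statement is the Claim_ definition above) =====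
theorem simulateKeypad_spec : Claim_equal_simulateKeypad := by
  intro commands _ _
  unfold Spec_simulateKeypad simulateKeypad simulateKeypad_alt
  rw [main_fold]
  simp
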